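-- pv_equiv track=rewrite | github.com/NixOS/nixpkgs | pkgs/tools/nix/nixos-render-docs/src/nixos_render_docs/md.py | md_make_code
-- ===== SOURCE A (Python) =====
-- from typing import Any, cast, Generic, get_args, Iterable, Literal, NoReturn, Optional, TypeVar
--
-- def md_make_code(code: str, info: str = "", multiline: Optional[bool] = None) -> str:
--     # for multi-line code blocks we only have to count ` runs at the beginning
--     # of a line, but this is much easier.
--     multiline = multiline or info != "" or '\n' in code
--     longest, current = (0, 0)
--     for c in code:
--         current = current + 1 if c == '`' else 0
--         longest = max(current, longest)
--     # inline literals need a space to separate ticks from content, code blocks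
--     # need newlines. inline literals need one extra tick, code blocks need three.
--     ticks, sep = ('`' * (longest + (3 if multiline else 1)), '\n' if multiline else ' ')
--     return f"{ticks}{info}{sep}{code}{sep}{ticks}"
-- ===== SOURCE B (Python) =====
-- def md_make_code(code: str, info: str = "", multiline=None) -> str:
--     multiline = multiline or info != "" or '\n' in code
--     # longest backtick run = largest k such that a k-long backtick string occurs in code
--     longest = 0
--     while '`' * (longest + 1) in code:
--         longest += 1
--     ticks = '`' * (longest + (3 if multiline else 1))
--     sep = '\n' if multiline else ' '
--     return f"{ticks}{info}{sep}{code}{sep}{ticks}"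
-- ===== Notes on version B (the rewrite author's own statement) =====
-- stated objective: alternative
-- what changed: The char-by-char running-counter state machine for the longest backtick run is replaced by direct substring probing: grow a candidate run length while a one-longer backtick string is still a substring of code; the formatting logic is unchanged.
import Mathlib
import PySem

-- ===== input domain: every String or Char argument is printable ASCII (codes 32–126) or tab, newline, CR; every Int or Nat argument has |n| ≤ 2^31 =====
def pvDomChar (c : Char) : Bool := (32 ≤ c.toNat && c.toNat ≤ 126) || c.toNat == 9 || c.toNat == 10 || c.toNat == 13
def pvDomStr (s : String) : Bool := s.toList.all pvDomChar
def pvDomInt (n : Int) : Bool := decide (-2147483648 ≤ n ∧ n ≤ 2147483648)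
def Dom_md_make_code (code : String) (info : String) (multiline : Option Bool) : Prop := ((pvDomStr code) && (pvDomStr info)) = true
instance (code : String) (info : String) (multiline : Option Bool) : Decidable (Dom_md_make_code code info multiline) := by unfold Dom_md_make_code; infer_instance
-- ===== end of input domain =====

-- B replaces A's char-by-char running-counter scan by substring probing ('`'*(k+1) in code);
-- same formatting logic, same result (objective: alternative decomposition).

-- ===== PORT A =====
def md_make_code (code : String) (info : String) (multiline : Option Bool) : String :=
  -- multiline = multiline or info != "" or '\n' in code
  let ml : Bool := multiline.getD false || info != "" || PySem.Str.isIn "\n" code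
  -- longest, current = (0, 0); for c in code: …
  let p := code.toList.foldl
    (fun (s : Nat × Nat) c =>
      let current := if c = '`' then s.2 + 1 else 0
      (max current s.1, current)) (0, 0)
  let ticks := String.ofList (List.replicate (p.1 + (if ml then 3 else 1)) '`')
  let sep := if ml then "\n" else " "
  ticks ++ info ++ sep ++ code ++ sep ++ ticks

-- ===== PORT B =====
-- while '`' * (longest + 1) in code: longest += 1
def bloop (code : List Char) (k : Nat) : Nat :=
  if h : PySem.Chars.isIn (List.replicate (k + 1) '`') code = true then
    bloop code (k + 1)
  else k
termination_by code.length + 1 - k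
decreasing_by
  have h1 := (PySem.Chars.isIn_iff_infix _ _).1 h
  have h2 := h1.length_le
  simp only [List.length_replicate] at h2
  omega

def md_make_code_alt (code : String) (info : String) (multiline : Option Bool) : String :=
  let ml : Bool := multiline.getD false || info != "" || PySem.Str.isIn "\n" code
  let longest := bloop code.toList 0
  let ticks := String.ofList (List.replicate (longest + (if ml then 3 else 1)) '`')
  let sep := if ml then "\n" else " "
  ticks ++ info ++ sep ++ code ++ sep ++ ticks

-- ===== PRECONDITION & SPEC =====
def Spec_md_make_code (code : String) (info : String) (multiline : Option Bool) (out : String) : Prop := out = md_make_code_alt code info multiline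
instance (code : String) (info : String) (multiline : Option Bool) (out : String) : Decidable (Spec_md_make_code code info multiline out) := by unfold Spec_md_make_code; infer_instance

-- ===== CLAIM (what is proved, stated in full; the proofs are below) =====
def Claim_equal_md_make_code : Prop := ∀ (code : String) (info : String) (multiline : Option Bool), Dom_md_make_code code info multiline → Spec_md_make_code code info multiline (md_make_code code info multiline)

-- ===== LEMMAS AND PROOFS =====

-- structural form of A's running-counter loop: best run, crediting a leading run by `cur`
def bw (cur : Nat) : List Char → Nat
  | [] => 0
  | c :: t => if c = '`' then max (cur + 1) (bw (cur + 1) t) else bw 0 t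

theorem foldl_eq_bw (l : List Char) (a cur : Nat) :
    (l.foldl (fun (s : Nat × Nat) c =>
      let current := if c = '`' then s.2 + 1 else 0
      (max current s.1, current)) (a, cur)).1 = max a (bw cur l) := by
  induction l generalizing a cur with
  | nil => simp [bw]
  | cons c t ih =>
    simp only [List.foldl_cons, bw]
    by_cases hc : c = '`' <;> simp only [hc, if_true, if_false, ih] <;> omega

theorem repl_cons_eq (cur : Nat) (t : List Char) :
    List.replicate cur '`' ++ '`' :: t = List.replicate (cur + 1) '`' ++ t := by
  rw [List.replicate_succ']
  simp

theorem bw_infix (l : List Char) (cur : Nat) :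
    List.replicate (bw cur l) '`' <:+: List.replicate cur '`' ++ l := by
  induction l generalizing cur with
  | nil => simp [bw]
  | cons c t ih =>
    by_cases hc : c = '`'
    · subst hc
      rw [repl_cons_eq]
      simp only [bw, if_true]
      rcases max_choice (cur + 1) (bw (cur + 1) t) with h | h <;> rw [h]
      · exact (List.prefix_append _ _).isInfix
      · exact ih (cur + 1)
    · simp only [bw, hc, if_false]
      exact (ih 0).trans (by
        have : t <:+: List.replicate cur '`' ++ c :: t :=
          ((List.suffix_cons c t).trans (List.suffix_append _ _)).isInfix
        simpa using this)

-- a backtick run in xs ++ c :: ys with c ≠ '`' lies entirely in xs or entirely in ys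
theorem repl_split {k : Nat} {xs ys : List Char} {c : Char} (hc : c ≠ '`')
    (h : List.replicate k '`' <:+: xs ++ c :: ys) :
    List.replicate k '`' <:+: xs ∨ List.replicate k '`' <:+: ys := by
  obtain ⟨s, t, heq⟩ := h
  by_cases h1 : s.length + k ≤ xs.length
  · left
    have hk : List.replicate k '`' = (xs.drop s.length).take k := by
      have e1 : ((s ++ List.replicate k '`' ++ t).drop s.length).take k
          = List.replicate k '`' := by
        rw [List.append_assoc, List.drop_left, List.take_append_of_le_length (by simp),
          List.take_of_length_le (by simp)]
      rw [heq] at e1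
      rw [List.drop_append_of_le_length (by omega), List.take_append_of_le_length
        (by simp; omega)] at e1
      exact e1.symm
    rw [hk]
    exact ((List.take_prefix _ _).isInfix).trans (List.drop_suffix _ _).isInfix
  · by_cases h2 : xs.length < s.length
    · right
      have e1 : (s ++ List.replicate k '`' ++ t).drop (xs.length + 1)
          = s.drop (xs.length + 1) ++ List.replicate k '`' ++ t := by
        rw [List.append_assoc, List.drop_append_of_le_length (by omega), List.append_assoc]
      have e2 : (xs ++ c :: ys).drop (xs.length + 1) = ys := by
        have : xs ++ c :: ys = (xs ++ [c]) ++ ys := by simp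
        rw [this]
        have hl : xs.length + 1 = (xs ++ [c]).length := by simp
        rw [hl, List.drop_left]
      rw [heq] at e1
      rw [e2] at e1
      exact ⟨s.drop (xs.length + 1), t, e1.symm⟩
    · exfalso
      have hA : (xs ++ c :: ys)[xs.length]? = some c := by
        rw [List.getElem?_append_right (le_refl _)]
        simp
      have hB : (s ++ (List.replicate k '`' ++ t))[xs.length]? = some '`' := by
        rw [List.getElem?_append_right (by omega)]
        rw [List.getElem?_append_left (by simp; omega)]
        simp [List.getElem?_replicate]
        omega
      rw [← List.append_assoc, heq, hA] at hB
      exact hc (Option.some.inj hB)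
  
theorem bw_max (l : List Char) : ∀ (cur k : Nat),
    List.replicate k '`' <:+: List.replicate cur '`' ++ l → k ≤ max cur (bw cur l) := by
  induction l with
  | nil =>
    intro cur k h
    have := h.length_le
    simp at this
    omega
  | cons c t ih =>
    intro cur k h
    by_cases hc : c = '`'
    · subst hc
      rw [repl_cons_eq] at h
      have := ih (cur + 1) k h
      simp only [bw, if_true]
      omega
    · rcases repl_split hc h with h' | h'
      · have := h'.length_le
        simp at this
        simp only [bw, hc, if_false]
        omega
      · have := ih 0 k (by simpa using h')
        simp only [bw, hc, if_false]
        omega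

theorem bloop_eq_bw (code : List Char) : ∀ (n k : Nat),
    code.length + 1 - k ≤ n → List.replicate k '`' <:+: code → bloop code k = bw 0 code := by
  intro n
  induction n with
  | zero =>
    intro k hn h
    have := h.length_le
    simp at this
    omega
  | succ n ih =>
    intro k hn h
    rw [bloop]
    split
    · rename_i hin
      have hinf := (PySem.Chars.isIn_iff_infix _ _).1 hin
      have := hinf.length_le
      simp only [List.length_replicate] at this
      exact ih (k + 1) (by omega) hinf
    · rename_i hin
      have hle : k ≤ bw 0 code := by
        have := bw_max code 0 k (by simpa using h)
        omega
      rcases Nat.lt_or_ge k (bw 0 code) with hlt | hge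
      · exfalso
        apply hin
        rw [PySem.Chars.isIn_iff_infix]
        have hpre : List.replicate (k + 1) '`' <+: List.replicate (bw 0 code) '`' := by
          refine ⟨List.replicate (bw 0 code - (k + 1)) '`', ?_⟩
          rw [← List.replicate_add]
          congr 1
          omega
        exact hpre.isInfix.trans (by simpa using bw_infix code 0)
      · omega

-- ===== VERDICT (by name: the statement is the Claim_ definition above) =====
theorem md_make_code_spec : Claim_equal_md_make_code := by
  unfold Claim_equal_md_make_code
  intro code info multiline _
  unfold Spec_md_make_code md_make_code md_make_code_alt
  have h1 : bloop code.toList 0 = bw 0 code.toList :=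
    bloop_eq_bw code.toList (code.toList.length + 1) 0 (by omega) (by simp)
  have h2 := foldl_eq_bw code.toList 0 0
  simp only [Nat.zero_max] at h2
  simp only [h1, h2]
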